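-- pv_equiv track=rewrite | github.com/declare-lab/RelationPrompt | utils.py | split_common_prefix
-- ===== SOURCE A (Python) =====
-- from typing import Dict, List, Optional, Set, Tuple, Union
--
-- def split_common_prefix(texts: List[str]) -> Tuple[str, List[str]]:
--     end = 0
--     i_max = min(map(len, texts))
--     for i in range(i_max):
--         if len(set([t[i] for t in texts])) > 1:
--             break
--         end += 1
--
--     prefix = texts[0][:end]
--     texts = [t[end:] for t in texts]
--     return prefix, texts
-- ===== SOURCE B (Python) =====
-- def _lcp(cap, a, b):
--     n = 0
--     for x, y in zip(a, b):
--         if n >= cap or x != y: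
--             break
--         n += 1
--     return n
--
-- def split_common_prefix(texts):
--     end = min(map(len, texts))  # raises ValueError on an empty list, like A
--     first = texts[0]
--     for t in texts[1:]:
--         end = _lcp(end, first, t)
--     return first[:end], [t[end:] for t in texts]
-- ===== Notes on version B (the rewrite author's own statement) =====
-- stated objective: alternative
-- what changed: B replaces A's position-by-position scan (building a set of the i-th characters of all strings at every position) with a string-by-string pass that maintains a single running common-prefix length, shrinking it by comparing each string against texts[0] only up to the current bound.
import Mathlib
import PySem

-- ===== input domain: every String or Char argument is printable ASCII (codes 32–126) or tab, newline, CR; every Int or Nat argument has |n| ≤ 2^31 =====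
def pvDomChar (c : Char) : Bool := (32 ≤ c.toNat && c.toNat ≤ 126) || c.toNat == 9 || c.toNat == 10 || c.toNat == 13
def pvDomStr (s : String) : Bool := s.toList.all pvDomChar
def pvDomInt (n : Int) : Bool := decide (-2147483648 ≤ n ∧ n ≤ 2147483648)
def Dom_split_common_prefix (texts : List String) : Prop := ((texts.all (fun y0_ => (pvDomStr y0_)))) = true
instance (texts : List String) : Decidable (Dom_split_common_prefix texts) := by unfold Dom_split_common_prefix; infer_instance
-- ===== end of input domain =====

-- B splits off the common prefix by a string-by-string pass maintaining one running
-- common-prefix length, instead of A's position-by-position scan building a set of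
-- i-th characters; same value on every nonempty input (A raises ValueError on []).


-- ===== PORT A =====
-- the for-i-in-range loop with break: counts positions until the set of i-th chars has >1 element
def pvALoop (texts : List String) : Nat → Nat → Nat → Nat
  | 0, _, e => e
  | k + 1, i, e =>
    if (PySem.Set.ofList (texts.map fun t => PySem.Str.pyGet? t (i : Int))).length > 1 then e
    else pvALoop texts k (i + 1) (e + 1)

def split_common_prefix (texts : List String) : String × List String :=
  let i_max := ((PySem.List.min? (texts.map fun t => PySem.Str.len t) (fun x => x)).getD 0).toNat
  let e := pvALoop texts i_max 0 0
  let pre := PySem.Str.slice (texts.getD 0 "") none (some (e : Int))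
  (pre, texts.map fun t => PySem.Str.slice t (some (e : Int)) none)

-- ===== PORT B =====
-- _lcp(cap, a, b): the zip loop, recursion on both char lists with the cap counting down
def pvLcp : Nat → List Char → List Char → Nat
  | cap, x :: xs, y :: ys => if cap = 0 || x != y then 0 else pvLcp (cap - 1) xs ys + 1
  | _, _, _ => 0

def split_common_prefix_alt (texts : List String) : String × List String :=
  let e0 := ((PySem.List.min? (texts.map fun t => PySem.Str.len t) (fun x => x)).getD 0).toNat
  let first := texts.getD 0 ""
  let e := (texts.drop 1).foldl (fun e t => pvLcp e first.toList t.toList) e0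
  (PySem.Str.slice first none (some (e : Int)), texts.map fun t => PySem.Str.slice t (some (e : Int)) none)

-- ===== PRECONDITION & SPEC =====
-- A raises ValueError (min() of an empty sequence) on texts = []; excluded (B raises there too).
def Pre_split_common_prefix (texts : List String) : Prop := texts ≠ []
instance (texts : List String) : Decidable (Pre_split_common_prefix texts) := by unfold Pre_split_common_prefix; infer_instance
def pvWitness_split_common_prefix : List String := ["ab", "ac"]

def Spec_split_common_prefix (texts : List String) (out : String × List String) : Prop := out = split_common_prefix_alt texts
instance (texts : List String) (out : String × List String) : Decidable (Spec_split_common_prefix texts out) := by unfold Spec_split_common_prefix; infer_instance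

-- ===== CLAIM (what is proved, stated in full; the proofs are below) =====
def Claim_equal_split_common_prefix : Prop := ∀ (texts : List String), Dom_split_common_prefix texts → Pre_split_common_prefix texts → Spec_split_common_prefix texts (split_common_prefix texts)

-- ===== LEMMAS AND PROOFS =====

-- uncapped common-prefix length of two char lists (proof-side characterisation)
def lcpN : List Char → List Char → Nat
  | x :: xs, y :: ys => if x = y then lcpN xs ys + 1 else 0
  | _, _ => 0

theorem pvLcp_eq_min : ∀ (cap : Nat) (a b : List Char), pvLcp cap a b = min cap (lcpN a b) := by
  intro cap a
  induction a generalizing cap with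
  | nil => intro b; cases b <;> simp [pvLcp, lcpN]
  | cons x xs ih =>
    intro b
    cases b with
    | nil => simp [pvLcp, lcpN]
    | cons y ys =>
      by_cases hxy : x = y
      · cases cap with
        | zero => simp [pvLcp, lcpN, hxy]
        | succ c =>
          have h1 : pvLcp (c + 1) (x :: xs) (y :: ys) = pvLcp c xs ys + 1 := by
            simp [pvLcp, hxy]
          have h2 : lcpN (x :: xs) (y :: ys) = lcpN xs ys + 1 := by simp [lcpN, hxy]
          rw [h1, h2, ih c ys]
          omega
      · simp [pvLcp, lcpN, hxy]

theorem lcpN_agree : ∀ (a b : List Char) (j : Nat), j < lcpN a b → a[j]? = b[j]? := by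
  intro a
  induction a with
  | nil => intro b j h; cases b <;> simp [lcpN] at h
  | cons x xs ih =>
    intro b j h
    cases b with
    | nil => simp [lcpN] at h
    | cons y ys =>
      by_cases hxy : x = y
      · cases j with
        | zero => simp [hxy]
        | succ k => simp only [List.getElem?_cons_succ]
                    exact ih ys k (by simp [lcpN, hxy] at h; omega)
      · simp [lcpN, hxy] at h

theorem lcpN_mismatch : ∀ (a b : List Char), lcpN a b < a.length → lcpN a b < b.length →
    a[lcpN a b]? ≠ b[lcpN a b]? := by
  intro a
  induction a with
  | nil => intro b h _; simp at h
  | cons x xs ih =>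
    intro b h1 h2
    cases b with
    | nil => simp at h2
    | cons y ys =>
      by_cases hxy : x = y
      · simp only [lcpN, if_pos hxy] at *
        simpa using ih ys (by simpa using h1) (by simpa using h2)
      · simp [lcpN, hxy]

-- generic facts about the running-min fold
theorem foldl_min_le_init (g : String → Nat) : ∀ (l : List String) (a : Nat),
    l.foldl (fun e t => min e (g t)) a ≤ a := by
  intro l
  induction l with
  | nil => intro a; simp
  | cons t ts ih =>
    intro a
    simp only [List.foldl_cons]
    exact le_trans (ih (min a (g t))) (min_le_left _ _)

theorem foldl_min_le_mem (g : String → Nat) : ∀ (l : List String) (a : Nat) (t : String),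
    t ∈ l → l.foldl (fun e t => min e (g t)) a ≤ g t := by
  intro l
  induction l with
  | nil => intro a t h; simp at h
  | cons u us ih =>
    intro a t h
    simp only [List.foldl_cons]
    rcases List.mem_cons.mp h with h | h
    · subst h; exact le_trans (foldl_min_le_init g us _) (min_le_right _ _)
    · exact ih _ t h

theorem foldl_min_cases (g : String → Nat) : ∀ (l : List String) (a : Nat),
    l.foldl (fun e t => min e (g t)) a = a ∨ ∃ t ∈ l, l.foldl (fun e t => min e (g t)) a = g t := by
  intro l
  induction l with
  | nil => intro a; left; rfl
  | cons u us ih =>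
    intro a
    simp only [List.foldl_cons]
    rcases ih (min a (g u)) with h | ⟨t, ht, h⟩
    · rcases min_choice a (g u) with hm | hm
      · left; rw [h, hm]
      · right; exact ⟨u, by simp, by rw [h, hm]⟩
    · right; exact ⟨t, by simp [ht], h⟩

-- a list with no duplicates containing two distinct members has length > 1
theorem nodup_two_lt_length {α : Type} (s : List α) (a b : α) (ha : a ∈ s) (hb : b ∈ s)
    (hab : a ≠ b) : 1 < s.length := by
  cases s with
  | nil => simp at ha
  | cons z t =>
    cases t with
    | nil => simp at ha hb; exact absurd (ha.trans hb.symm) hab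
    | cons w r => simp only [List.length_cons]; omega

-- A's set condition: set of x :: l has more than one element iff some member of l differs from x
theorem setsize_gt_one_iff {α : Type} [BEq α] [LawfulBEq α] (x : α) (l : List α) :
    1 < (PySem.Set.ofList (x :: l)).length ↔ ∃ y ∈ l, y ≠ x := by
  constructor
  · intro h
    by_contra hc
    have hall : ∀ y ∈ PySem.Set.ofList (x :: l), y = x := by
      intro y hy
      rcases List.mem_cons.mp ((PySem.Set.mem_ofList (x :: l) y).mp hy) with h' | h'
      · exact h'
      · by_contra hne; exact hc ⟨y, h', hne⟩
    match hs : PySem.Set.ofList (x :: l) with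
    | [] =>
      have hx : x ∈ PySem.Set.ofList (x :: l) := (PySem.Set.mem_ofList (x :: l) x).mpr (by simp)
      rw [hs] at hx; simp at hx
    | [z] => rw [hs] at h; simp at h
    | z :: w :: r =>
      have hnd := PySem.Set.nodup_ofList (x :: l)
      rw [hs] at hnd hall
      have hz : z = x := hall z (by simp)
      have hw : w = x := hall w (by simp)
      rcases List.nodup_cons.mp hnd with ⟨hzn, _⟩
      exact hzn (by rw [hz, ← hw]; simp)
  · rintro ⟨y, hy, hyx⟩
    exact nodup_two_lt_length _ y x
      ((PySem.Set.mem_ofList _ y).mpr (by simp [hy]))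
      ((PySem.Set.mem_ofList _ x).mpr (by simp))
      hyx

-- the loop of A computes the running minimum R of the capped lcp's
theorem aloop_eq (f : String) (rest : List String) (i_max : Nat)
    (hlen : ∀ t ∈ f :: rest, i_max ≤ t.toList.length) :
    ∀ (k i e : Nat), i + k = i_max →
      i ≤ rest.foldl (fun e t => min e (lcpN f.toList t.toList)) i_max →
      pvALoop (f :: rest) k i e =
        e + (rest.foldl (fun e t => min e (lcpN f.toList t.toList)) i_max - i) := by
  set R := rest.foldl (fun e t => min e (lcpN f.toList t.toList)) i_max with hRdef
  have hRmax : R ≤ i_max := foldl_min_le_init _ rest i_max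
  have hRle : ∀ t ∈ rest, R ≤ lcpN f.toList t.toList :=
    foldl_min_le_mem (fun t => lcpN f.toList t.toList) rest i_max
  intro k
  induction k with
  | zero =>
    intro i e h0 hiR
    simp only [pvALoop]
    omega
  | succ k ih =>
    intro i e hk hiR
    have hi : i < i_max := by omega
    · simp only [pvALoop]
      by_cases hir : i < R
      · rw [if_neg, ih (i + 1) (e + 1) (by omega) (by omega)]
        · omega
        · simp only [List.map_cons, gt_iff_lt, setsize_gt_one_iff]
          rintro ⟨y, hy, hne⟩
          obtain ⟨t, ht, rfl⟩ := List.mem_map.mp hy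
          apply hne
          rw [PySem.Str.pyGet?_natCast, PySem.Str.pyGet?_natCast]
          exact (lcpN_agree f.toList t.toList i (lt_of_lt_of_le hir (hRle t ht))).symm
      · have hiR' : i = R := by omega
        rw [if_pos]
        · omega
        · rcases foldl_min_cases (fun t => lcpN f.toList t.toList) rest i_max with hR | ⟨t, ht, hRt⟩
          · rw [← hRdef] at hR; omega
          · rw [← hRdef] at hRt
            simp only [List.map_cons, gt_iff_lt, setsize_gt_one_iff]
            refine ⟨PySem.Str.pyGet? t (i : Int), List.mem_map.mpr ⟨t, ht, rfl⟩, ?_⟩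
            rw [PySem.Str.pyGet?_natCast, PySem.Str.pyGet?_natCast]
            have hieq : i = lcpN f.toList t.toList := by omega
            rw [hieq]
            exact (lcpN_mismatch f.toList t.toList
              (by have := hlen f (by simp); omega)
              (by have := hlen t (by simp [ht]); omega)).symm

-- ===== VERDICT (by name: the statement is the Claim_ definition above) =====
theorem split_common_prefix_spec : Claim_equal_split_common_prefix := by
  intro texts _hdom hpre
  unfold Spec_split_common_prefix
  obtain ⟨f, rest, rfl⟩ : ∃ f rest, texts = f :: rest := by
    cases texts with
    | nil => exact absurd rfl hpre
    | cons f rest => exact ⟨f, rest, rfl⟩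
  unfold split_common_prefix split_common_prefix_alt
  obtain ⟨m, hm⟩ : ∃ m, PySem.List.min? ((f :: rest).map fun t => PySem.Str.len t) (fun x => x) = some m := by
    cases h : PySem.List.min? ((f :: rest).map fun t => PySem.Str.len t) (fun x => x) with
    | none => exact absurd ((PySem.List.min?_eq_none_iff _ _).mp h) (by simp)
    | some m => exact ⟨m, rfl⟩
  have hmin := PySem.List.min?_isMin hm
  have hlen : ∀ t ∈ f :: rest, m.toNat ≤ t.toList.length := by
    intro t ht
    have := hmin (PySem.Str.len t) (List.mem_map.mpr ⟨t, ht, rfl⟩)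
    simp only [PySem.Str.len_eq] at this
    omega
  simp only [hm, Option.getD_some, List.getD_cons_zero, List.drop_one, List.tail_cons]
  rw [aloop_eq f rest m.toNat hlen m.toNat 0 0 (by omega)
      (Nat.zero_le _)]
  have hfold : rest.foldl (fun e t => pvLcp e f.toList t.toList) m.toNat =
      rest.foldl (fun e t => min e (lcpN f.toList t.toList)) m.toNat := by
    simp only [pvLcp_eq_min]
  rw [hfold]
  simp
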